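-- pv_equiv track=rewrite | github.com/NobutakaShimada/ai-swing | gph_torq.py | m2p
-- ===== SOURCE A (Python) =====
-- def m2p(x):
--     B_idx = []
--     i = 0  # Pythonは0始まりのインデックス
--     while i < len(x) - 1:  # ループ内でlen(d1)-1の要素までアクセスする
--         if x[i] <= 0 and x[i+1] > 0:
--             B_idx.append(i)
--             i += 5  # インデックスで5は離れているべき
--         i += 1
--     return B_idx
-- ===== SOURCE B (Python) =====
-- def m2p(x):
--     # candidate upward crossings in one comprehension, then greedy min-gap-6 filter
--     cands = [i for i in range(len(x) - 1) if x[i] <= 0 and x[i + 1] > 0]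
--     out = []
--     next_allowed = 0
--     for c in cands:
--         if c >= next_allowed:
--             out.append(c)
--             next_allowed = c + 6
--     return out
-- ===== Notes on version B (the rewrite author's own statement) =====
-- stated objective: alternative
-- what changed: Replaces the fused while-loop that mutates the index (append then i+=5, i+=1) by candidate generation (a comprehension over all adjacent pairs) followed by a greedy watermark filter enforcing the minimum gap of 6.
import Mathlib
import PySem

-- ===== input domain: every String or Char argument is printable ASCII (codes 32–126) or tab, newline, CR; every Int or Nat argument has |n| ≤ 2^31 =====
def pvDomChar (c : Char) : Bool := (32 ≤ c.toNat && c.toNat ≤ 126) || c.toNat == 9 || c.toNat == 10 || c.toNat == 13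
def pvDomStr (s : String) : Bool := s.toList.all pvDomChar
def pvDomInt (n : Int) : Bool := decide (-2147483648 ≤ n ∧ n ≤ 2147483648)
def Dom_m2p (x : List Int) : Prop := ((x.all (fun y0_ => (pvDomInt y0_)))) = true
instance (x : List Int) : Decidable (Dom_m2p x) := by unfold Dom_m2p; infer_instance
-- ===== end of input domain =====

-- B replaces A's fused scan-and-skip while-loop by candidate generation plus a greedy
-- watermark filter (alternative decomposition, same O(n) cost).


-- ===== PORT A =====
-- A's while-loop; the index i stays in range (0 ≤ i < len-1 when reading), so getD is exact.
def m2pLoop (x : List Int) (i : Nat) (acc : List Int) : List Int :=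
  if h : i < x.length - 1 then
    if x.getD i 0 ≤ 0 ∧ x.getD (i + 1) 0 > 0 then
      m2pLoop x (i + 6) (acc ++ [(i : Int)])   -- append, i += 5, then i += 1
    else
      m2pLoop x (i + 1) acc
  else acc
termination_by x.length - 1 - i
decreasing_by all_goals omega

def m2p (x : List Int) : List Int := m2pLoop x 0 []

-- ===== PORT B =====
-- candidate comprehension
def m2pCands (x : List Int) : List Nat :=
  (List.range (x.length - 1)).filter (fun i => x.getD i 0 ≤ 0 ∧ x.getD (i + 1) 0 > 0)

-- greedy watermark pass over the candidates
def m2p_alt (x : List Int) : List Int :=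
  ((m2pCands x).foldl
    (fun (st : Nat × List Int) c => if st.1 ≤ c then (c + 6, st.2 ++ [(c : Int)]) else st)
    (0, [])).2

-- ===== PRECONDITION & SPEC =====
def Spec_m2p (x : List Int) (out : List Int) : Prop := out = m2p_alt x
instance (x : List Int) (out : List Int) : Decidable (Spec_m2p x out) := by unfold Spec_m2p; infer_instance

-- ===== CLAIM (what is proved, stated in full; the proofs are below) =====
def Claim_equal_m2p : Prop := ∀ (x : List Int), Dom_m2p x → Spec_m2p x (m2p x)

-- ===== LEMMAS AND PROOFS =====

-- the greedy filter, written as plain recursion (proof-side characterisation of B's fold)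
def pvGreedy (cs : List Nat) (w : Nat) : List Int :=
  match cs with
  | [] => []
  | c :: cs' => if w ≤ c then (c : Int) :: pvGreedy cs' (c + 6) else pvGreedy cs' w

theorem pvFoldl_eq_greedy (cs : List Nat) (w : Nat) (out : List Int) :
    (cs.foldl
      (fun (st : Nat × List Int) c => if st.1 ≤ c then (c + 6, st.2 ++ [(c : Int)]) else st)
      (w, out)).2 = out ++ pvGreedy cs w := by
  induction cs generalizing w out with
  | nil => simp [pvGreedy]
  | cons c cs ih =>
    simp only [List.foldl, pvGreedy]
    by_cases h : w ≤ c
    · simp [h, ih]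
    · simp [h, ih]

theorem pvGreedy_nil (cs : List Nat) (w : Nat) (h : ∀ c ∈ cs, c < w) : pvGreedy cs w = [] := by
  induction cs with
  | nil => rfl
  | cons c cs ih =>
    have hc := h c (by simp)
    simp only [pvGreedy]
    rw [if_neg (by omega)]
    exact ih (fun d hd => h d (by simp [hd]))

theorem pvGreedy_skip (cs : List Nat) (i : Nat) (h : i ∉ cs) :
    pvGreedy cs i = pvGreedy cs (i + 1) := by
  induction cs generalizing i with
  | nil => rfl
  | cons c cs ih =>
    have hc : c ≠ i := by intro e; exact h (by simp [e])
    have hns : i ∉ cs := fun m => h (by simp [m])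
    simp only [pvGreedy]
    by_cases hle : i ≤ c
    · have : i + 1 ≤ c := by omega
      rw [if_pos hle, if_pos this]
    · rw [if_neg hle, if_neg (by omega), ih i hns]

theorem pvGreedy_mem (cs : List Nat) (i : Nat) (hs : cs.Pairwise (· < ·)) (h : i ∈ cs) :
    pvGreedy cs i = (i : Int) :: pvGreedy cs (i + 6) := by
  induction cs generalizing i with
  | nil => cases h
  | cons c cs ih =>
    rcases List.pairwise_cons.mp hs with ⟨hlt, hp⟩
    simp only [pvGreedy]
    rcases List.mem_cons.mp h with he | hm
    · subst he
      rw [if_pos (le_refl _), if_neg (by omega)]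
    · have hci : c < i := hlt i hm
      rw [if_neg (by omega), if_neg (by omega)]
      exact ih i hp hm

theorem pvCands_pairwise (x : List Int) : (m2pCands x).Pairwise (· < ·) :=
  (List.pairwise_lt_range).filter _

theorem pvMem_cands (x : List Int) (i : Nat) :
    i ∈ m2pCands x ↔ i < x.length - 1 ∧ (x.getD i 0 ≤ 0 ∧ x.getD (i + 1) 0 > 0) := by
  simp [m2pCands, List.mem_filter, List.mem_range]

theorem pvLoop_eq (x : List Int) (i : Nat) (acc : List Int) :
    m2pLoop x i acc = acc ++ pvGreedy (m2pCands x) i := by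
  induction i, acc using m2pLoop.induct x with
  | case1 i acc h hc ih =>
    have hmem : i ∈ m2pCands x := (pvMem_cands x i).mpr ⟨h, hc⟩
    rw [m2pLoop, dif_pos h, if_pos hc, ih,
      pvGreedy_mem _ _ (pvCands_pairwise x) hmem]
    simp
  | case2 i acc h hc ih =>
    have hnm : i ∉ m2pCands x := fun m => hc ((pvMem_cands x i).mp m).2
    rw [m2pLoop, dif_pos h, if_neg hc, ih, pvGreedy_skip _ _ hnm]
  | case3 i acc h =>
    rw [m2pLoop, dif_neg h,
      pvGreedy_nil _ _ (fun c hc => by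
        have := ((pvMem_cands x c).mp hc).1; omega)]
    simp

-- ===== VERDICT (by name: the statement is the Claim_ definition above) =====
theorem m2p_spec : Claim_equal_m2p := by
  intro x _
  show m2p x = m2p_alt x
  rw [m2p, m2p_alt, pvFoldl_eq_greedy, pvLoop_eq]
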